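-- pv_equiv track=rewrite | github.com/Algorithm-study-busan/hosung | python/Prog_동물탐험.py | solution
-- ===== SOURCE A (Python) =====
-- def solution(n, path, order):
--     edges = [[] for _ in range(200000)]
--
--     for a,b in path :
--         edges[a].append(b)
--         edges[b].append(a)
--
--     need = dict()
--     for a,b in order :
--         need[b] = a
--
--     visited = set()
--     can_go = dict()
--
--     def dfs(cur) :
--         if cur in need and need[cur] not in visited :
--             can_go[need[cur]] = cur
--             return
--
--         visited.add(cur)
--         for nxt in edges[cur] :
--             if nxt in visited : continue
--             dfs(nxt)
--
--         if cur in can_go :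
--             dfs(can_go[cur])
--
--     dfs(0)
--     return len(visited) == n
-- ===== SOURCE B (Python) =====
-- def solution(n, path, order):
--     edges = [[] for _ in range(200000)]
--
--     for a, b in path:
--         edges[a].append(b)
--         edges[b].append(a)
--
--     need = dict()
--     for a, b in order:
--         need[b] = a
--
--     visited = set()
--     can_go = dict()
--
--     # explicit-stack DFS: a frame is (cur, i) where i is the next index in edges[cur]
--     stack = [(0, 0)]
--     while stack:
--         cur, i = stack.pop()
--         if i == 0:
--             if cur in need and need[cur] not in visited:
--                 can_go[need[cur]] = cur
--                 continue
--             visited.add(cur)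
--         nb = edges[cur]
--         advanced = False
--         while i < len(nb):
--             nxt = nb[i]
--             i += 1
--             if nxt in visited:
--                 continue
--             stack.append((cur, i))
--             stack.append((nxt, 0))
--             advanced = True
--             break
--         if not advanced:
--             if cur in can_go:
--                 stack.append((can_go[cur], 0))
--     return len(visited) == n
-- ===== Notes on version B (the rewrite author's own statement) =====
-- stated objective: alternative
-- what changed: The recursive dfs (closure-mutating, recursion-limited) is replaced by an iterative explicit-stack traversal whose frames carry (node, next-neighbour-index), reproducing the same visit order, prerequisite checks and deferred can_go re-visits; edges/need/visited/can_go bookkeeping is unchanged.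
import Mathlib
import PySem

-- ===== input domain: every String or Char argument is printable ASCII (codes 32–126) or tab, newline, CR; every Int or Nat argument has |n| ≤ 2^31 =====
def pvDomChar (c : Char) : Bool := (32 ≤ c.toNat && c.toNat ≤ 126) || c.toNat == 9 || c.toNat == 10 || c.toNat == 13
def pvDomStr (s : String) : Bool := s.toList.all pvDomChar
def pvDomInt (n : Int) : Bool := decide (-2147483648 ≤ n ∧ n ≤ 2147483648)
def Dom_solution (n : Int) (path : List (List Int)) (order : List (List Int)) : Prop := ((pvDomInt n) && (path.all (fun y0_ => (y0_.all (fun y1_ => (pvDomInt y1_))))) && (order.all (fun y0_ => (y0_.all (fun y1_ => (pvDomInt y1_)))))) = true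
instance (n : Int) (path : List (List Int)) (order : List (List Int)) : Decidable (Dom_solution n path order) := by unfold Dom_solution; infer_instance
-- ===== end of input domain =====

-- B rewrites A's recursive dfs as an explicit-stack iterative traversal (same edges/need/visited/can_go
-- data and the same visit order); same complexity, objective: alternative decomposition.

-- Shared setup (identical in both Pythons): the 200000-slot adjacency table
-- (Python list indexing wraps negative indices: exact for -200000 ≤ x < 200000, the range Pre_ admits)
def pvIdx (x : Int) : Nat := (if x < 0 then x + 200000 else x).toNat

def pvEdges (path : List (List Int)) : Array (List Int) :=
  path.foldl (fun e row =>
    match row with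
    | [a, b] =>
      let e1 := e.set! (pvIdx a) (e.getD (pvIdx a) [] ++ [b])
      e1.set! (pvIdx b) (e1.getD (pvIdx b) [] ++ [a])
    | _ => e) (Array.replicate 200000 [])

def pvNeed (order : List (List Int)) : PySem.Dict Int Int :=
  order.foldl (fun d row =>
    match row with
    | [a, b] => d.insert b a
    | _ => d) PySem.Dict.empty

-- state: (visited, can_go)
abbrev StA := PySem.Set Int × PySem.Dict Int Int

-- fuel: a generous upper bound on the number of dfs events; both ports stop as soon as the
-- traversal is over, the fuel is only a totality device and is never exhausted on Pre_ inputs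
def pvFuel (path : List (List Int)) (order : List (List Int)) : Nat :=
  (2 * path.length + order.length + 4) ^ 4 + 1

-- ===== PORT A =====
-- A's recursion, fuel-threaded as a totality device: one unit is consumed at each dfs entry and one
-- at each return-to-parent; the second component is the remaining fuel (0 = exhausted, aborts all).
-- The `min g f'` clamp only justifies termination: the remaining fuel never exceeds the fuel put in
-- (lemma dfs_fuel_le below), so `min g f' = g` whenever it is reached.
mutual
def dfsA (e : Array (List Int)) (nd : PySem.Dict Int Int) (f : Nat) (cur : Int) (st : StA) :
    StA × Nat :=
  match f with
  | 0 => (st, 0)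
  | Nat.succ f' =>
    match nd.get? cur with
    | some p =>
      if PySem.Set.contains st.1 p then
        dfsNbrsA e nd f' cur (e.getD (pvIdx cur) []) (PySem.Set.add st.1 cur, st.2)
      else ((st.1, st.2.insert p cur), f')
    | none =>
      dfsNbrsA e nd f' cur (e.getD (pvIdx cur) []) (PySem.Set.add st.1 cur, st.2)
termination_by (f, 0)

def dfsNbrsA (e : Array (List Int)) (nd : PySem.Dict Int Int) (f : Nat) (cur : Int)
    (l : List Int) (st : StA) : StA × Nat :=
  match f with
  | 0 => (st, 0)
  | Nat.succ f' =>
    match l with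
    | [] =>
      match st.2.get? cur with
      | some t => dfsA e nd (Nat.succ f') t st
      | none => (st, Nat.succ f')
    | nxt :: rest =>
      if PySem.Set.contains st.1 nxt then dfsNbrsA e nd (Nat.succ f') cur rest st
      else
        match dfsA e nd (Nat.succ f') nxt st with
        | (st2, 0) => (st2, 0)
        | (st2, Nat.succ g) => dfsNbrsA e nd (min g f') cur rest st2
termination_by (f, l.length + 1)
decreasing_by all_goals (simp_wf; first
  | (apply Prod.Lex.right; omega)
  | (apply Prod.Lex.left; omega))
end

def solution (n : Int) (path : List (List Int)) (order : List (List Int)) : Bool :=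
  ((PySem.Set.len (dfsA (pvEdges path) (pvNeed order) (pvFuel path order) 0
      (PySem.Set.empty, PySem.Dict.empty)).1.1 : Int) == n)

-- ===== PORT B =====
-- B's explicit stack: a frame is (cur, i), i = next index into edges[cur]

-- the inner `while i < len(nb)` scan: first unvisited neighbour at index ≥ i, with the index after it
def findNextB (vis : PySem.Set Int) : List Int → Nat → Option (Int × Nat)
  | [], _ => none
  | x :: r, i => if PySem.Set.contains vis x then findNextB vis r (i + 1) else some (x, i + 1)

-- one frame's scan step: the pushes performed after the (possible) first-touch bookkeeping
def scanB (e : Array (List Int)) (cur : Int) (i : Nat) (rest : List (Int × Nat)) (st : StA) :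
    List (Int × Nat) × StA :=
  match findNextB st.1 ((e.getD (pvIdx cur) []).drop i) i with
  | some (nxt, j) => ((nxt, 0) :: (cur, j) :: rest, st)
  | none =>
    match st.2.get? cur with
    | some t => ((t, 0) :: rest, st)
    | none => (rest, st)

def loopB (e : Array (List Int)) (nd : PySem.Dict Int Int) (f : Nat)
    (stack : List (Int × Nat)) (st : StA) : StA :=
  match f, stack with
  | 0, _ => st
  | Nat.succ _, [] => st
  | Nat.succ f', (cur, i) :: rest =>
    if i = 0 then
      match nd.get? cur with
      | some p =>
        if PySem.Set.contains st.1 p then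
          let s := scanB e cur 0 rest (PySem.Set.add st.1 cur, st.2)
          loopB e nd f' s.1 s.2
        else loopB e nd f' rest (st.1, st.2.insert p cur)
      | none =>
        let s := scanB e cur 0 rest (PySem.Set.add st.1 cur, st.2)
        loopB e nd f' s.1 s.2
    else
      let s := scanB e cur i rest st
      loopB e nd f' s.1 s.2

def solution_alt (n : Int) (path : List (List Int)) (order : List (List Int)) : Bool :=
  ((PySem.Set.len (loopB (pvEdges path) (pvNeed order) (pvFuel path order) [(0, 0)]
      (PySem.Set.empty, PySem.Dict.empty)).1 : Int) == n)

-- ===== PRECONDITION & SPEC =====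
-- Pre_ excludes exactly the inputs on which the Python raises: a row of path or order that is not a
-- 2-element list (ValueError on unpacking) and a path endpoint outside [-200000, 200000) (IndexError)
def Pre_solution (n : Int) (path : List (List Int)) (order : List (List Int)) : Prop :=
  (path.all (fun r =>
      match r with
      | [a, b] => decide (-200000 ≤ a ∧ a < 200000 ∧ -200000 ≤ b ∧ b < 200000)
      | _ => false)
    && order.all (fun r => r.length == 2)) = true
instance (n : Int) (path : List (List Int)) (order : List (List Int)) : Decidable (Pre_solution n path order) := by unfold Pre_solution; infer_instance

def pvWitness_solution : Int × List (List Int) × List (List Int) :=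
  (3, [[0, 1], [1, 2]], [[2, 1]])

def Spec_solution (n : Int) (path : List (List Int)) (order : List (List Int)) (out : Bool) : Prop := out = solution_alt n path order
instance (n : Int) (path : List (List Int)) (order : List (List Int)) (out : Bool) : Decidable (Spec_solution n path order out) := by unfold Spec_solution; infer_instance

-- ===== CLAIM (what is proved, stated in full; the proofs are below) =====
def Claim_equal_solution : Prop := ∀ (n : Int) (path : List (List Int)) (order : List (List Int)), Dom_solution n path order → Pre_solution n path order → Spec_solution n path order (solution n path order)

-- ===== LEMMAS AND PROOFS =====

theorem loopB_nil (e : Array (List Int)) (nd : PySem.Dict Int Int) (f : Nat) (st : StA) :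
    loopB e nd f [] st = st := by
  cases f <;> simp [loopB]

theorem scanB_snd (e : Array (List Int)) (cur : Int) (i : Nat) (rest : List (Int × Nat))
    (st : StA) : (scanB e cur i rest st).2 = st := by
  simp only [scanB]
  split
  · rfl
  · split <;> rfl

theorem drop_cons_step {l : List Int} {i : Nat} {x : Int} {r : List Int}
    (h : l.drop i = x :: r) : l.drop (i + 1) = r := by
  have h2 : l.drop (i + 1) = (l.drop i).drop 1 := by rw [List.drop_drop]
  rw [h2, h]; rfl

-- remaining fuel never exceeds the fuel put in
theorem dfs_fuel_le (e : Array (List Int)) (nd : PySem.Dict Int Int) :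
    ∀ f : Nat, (∀ cur st, (dfsA e nd f cur st).2 ≤ f)
      ∧ (∀ cur l st, (dfsNbrsA e nd f cur l st).2 ≤ f) := by
  intro f
  induction f using Nat.strong_induction_on with
  | _ f IH =>
    have hA : ∀ cur st, (dfsA e nd f cur st).2 ≤ f := by
      intro cur st
      cases f with
      | zero => simp [dfsA]
      | succ f' =>
        have hN' := (IH f' (Nat.lt_succ_self f')).2
        cases hnd : nd.get? cur with
        | none =>
          simp only [dfsA, hnd]
          exact Nat.le_succ_of_le (hN' cur _ _)
        | some p =>
          by_cases hc : p ∈ st.1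
          · simp [dfsA, hnd, hc]
            exact Nat.le_succ_of_le (hN' cur _ _)
          · simp [dfsA, hnd, hc]
    refine ⟨hA, ?_⟩
    intro cur l
    induction l with
    | nil =>
      intro st
      cases f with
      | zero => simp [dfsNbrsA]
      | succ f' =>
        simp only [dfsNbrsA]
        cases ht : st.2.get? cur with
        | some t => exact hA t st
        | none => exact Nat.le_refl _
    | cons x r IHl =>
      intro st
      cases f with
      | zero => simp [dfsNbrsA]
      | succ f' =>
        by_cases hv : x ∈ st.1
        · simpa [dfsNbrsA, hv] using IHl st
        · rcases hdfs : dfsA e nd (Nat.succ f') x st with ⟨st2, f2⟩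
          cases f2 with
          | zero => simp [dfsNbrsA, hv, hdfs]
          | succ g =>
            have hm : min g f' < Nat.succ f' := Nat.lt_succ_of_le (Nat.min_le_right g f')
            have h2 := (IH _ hm).2 cur r st2
            simp [dfsNbrsA, hv, hdfs]
            omega

-- the two simulation statements: a fresh frame runs A's dfs, a scan step runs A's neighbour loop
def PSim (e : Array (List Int)) (nd : PySem.Dict Int Int) (f : Nat) : Prop :=
  ∀ (cur : Int) (st : StA) (rest : List (Int × Nat)),
    loopB e nd f ((cur, 0) :: rest) st
      = loopB e nd (dfsA e nd f cur st).2 rest (dfsA e nd f cur st).1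

def QSim (e : Array (List Int)) (nd : PySem.Dict Int Int) (f : Nat) : Prop :=
  ∀ (cur : Int) (l : List Int) (i : Nat) (st : StA) (rest : List (Int × Nat)),
    (e.getD (pvIdx cur) []).drop i = l →
    loopB e nd f (scanB e cur i rest st).1 (scanB e cur i rest st).2
      = loopB e nd (dfsNbrsA e nd f cur l st).2 rest (dfsNbrsA e nd f cur l st).1

theorem sim (e : Array (List Int)) (nd : PySem.Dict Int Int) :
    ∀ f : Nat, PSim e nd f ∧ QSim e nd f := by
  intro f
  induction f using Nat.strong_induction_on with
  | _ f IH =>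
    have hP : PSim e nd f := by
      cases f with
      | zero => intro cur st rest; simp [dfsA, loopB]
      | succ f' =>
        intro cur st rest
        have hQ' : QSim e nd f' := (IH f' (Nat.lt_succ_self f')).2
        cases hnd : nd.get? cur with
        | none =>
          have h1 : loopB e nd (f' + 1) ((cur, 0) :: rest) st
              = loopB e nd f' (scanB e cur 0 rest (PySem.Set.add st.1 cur, st.2)).1
                  (scanB e cur 0 rest (PySem.Set.add st.1 cur, st.2)).2 := by
            simp [loopB, hnd]
          rw [h1, hQ' cur (e.getD (pvIdx cur) []) 0 (PySem.Set.add st.1 cur, st.2) rest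
                (by simp)]
          simp [dfsA, hnd]
        | some p =>
          by_cases hc : p ∈ st.1
          · have h1 : loopB e nd (f' + 1) ((cur, 0) :: rest) st
                = loopB e nd f' (scanB e cur 0 rest (PySem.Set.add st.1 cur, st.2)).1
                    (scanB e cur 0 rest (PySem.Set.add st.1 cur, st.2)).2 := by
              simp [loopB, hnd, hc]
            rw [h1, hQ' cur (e.getD (pvIdx cur) []) 0 (PySem.Set.add st.1 cur, st.2) rest
                  (by simp)]
            simp [dfsA, hnd, hc]
          · simp [loopB, dfsA, hnd, hc]
    refine ⟨hP, ?_⟩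
    intro cur l
    induction l with
    | nil =>
      intro i st rest hdrop
      have hscan0 : scanB e cur i rest st
          = (match st.2.get? cur with
             | some t => ((t, 0) :: rest, st)
             | none => (rest, st)) := by
        simp only [scanB]; rw [hdrop]; simp only [findNextB]
      cases f with
      | zero => simp [dfsNbrsA, loopB, scanB_snd]
      | succ f' =>
        cases ht : st.2.get? cur with
        | some t =>
          simp only [hscan0, ht, dfsNbrsA]
          exact hP t st rest
        | none =>
          simp only [hscan0, ht, dfsNbrsA]
    | cons x r IHl =>
      intro i st rest hdrop
      have hdrop1 : (e.getD (pvIdx cur) []).drop (i + 1) = r := drop_cons_step hdrop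
      cases f with
      | zero => simp [dfsNbrsA, loopB, scanB_snd]
      | succ f' =>
        by_cases hv : x ∈ st.1
        · -- skipped neighbour: the scan step is the same as starting at i+1
          have hstep : scanB e cur i rest st = scanB e cur (i + 1) rest st := by
            simp only [scanB]; rw [hdrop, hdrop1]
            simp [findNextB, hv]
          rw [hstep, IHl (i + 1) st rest hdrop1]
          simp [dfsNbrsA, hv]
        · -- first unvisited neighbour found: push the child frame, resume at i+1
          have hL : (scanB e cur i rest st).1 = (x, 0) :: (cur, i + 1) :: rest := by
            simp only [scanB]; rw [hdrop]; simp [findNextB, hv]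
          rcases hdfs : dfsA e nd (Nat.succ f') x st with ⟨st2, f2⟩
          rw [hL, scanB_snd e cur i rest st, hP x st ((cur, i + 1) :: rest), hdfs]
          cases f2 with
          | zero =>
            simp [loopB, dfsNbrsA, hv, hdfs]
          | succ g =>
            have hgle : g ≤ f' := by
              have h2 := (dfs_fuel_le e nd (Nat.succ f')).1 x st
              rw [hdfs] at h2; omega
            have hmin : min g f' = g := Nat.min_eq_left hgle
            have hg : g < Nat.succ f' := Nat.lt_succ_of_le hgle
            have hQg := (IH g hg).2 cur r (i + 1) st2 rest hdrop1
            have hstep2 : loopB e nd (g + 1) ((cur, i + 1) :: rest) st2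
                = loopB e nd g (scanB e cur (i + 1) rest st2).1
                    (scanB e cur (i + 1) rest st2).2 := by
              simp [loopB]
            simp only []
            rw [hstep2, hQg]
            simp [dfsNbrsA, hv, hdfs, hmin]

-- ===== VERDICT (by name: the statement is the Claim_ definition above) =====
theorem solution_spec : Claim_equal_solution := by
  intro n path order _ _
  unfold Spec_solution solution solution_alt
  rw [(sim (pvEdges path) (pvNeed order) (pvFuel path order)).1 0
        (PySem.Set.empty, PySem.Dict.empty) [], loopB_nil]
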